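-- pv_equiv track=rewrite | github.com/kingofdreams777/Leetcode | disemvowel.py | disemvowel2
-- ===== SOURCE A (Python) =====
-- def disemvowel2(str: str) -> str:
--     vowels = ("a","e","i","o","u","A","E","I","O","U")
--     res = ""
--
--     splt = str.split(' ')
--
--     for word in splt:
--         for c in range(len(word)):
--             if c == 0:
--                 res = res + word[c]
--                 continue
--             if word[c] in vowels:
--                 continue
--             else:
--                 res = res + word[c]
--
--         res = res + " "
--
--     return res
-- ===== SOURCE B (Python) =====
-- def disemvowel2(str: str) -> str:
--     vowels = ("a","e","i","o","u","A","E","I","O","U")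
--     out = []
--     start = True
--     for c in str:
--         if c == ' ':
--             out.append(c)
--             start = True
--         elif start:
--             out.append(c)
--             start = False
--         elif c not in vowels:
--             out.append(c)
--     out.append(' ')
--     return ''.join(out)
-- ===== Notes on version B (the rewrite author's own statement) =====
-- stated objective: simpler
-- what changed: B drops the split(' ')+nested index loop entirely: one left-to-right pass over the characters with a word-start boolean flag, appending the single trailing space at the end.
import Mathlib
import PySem

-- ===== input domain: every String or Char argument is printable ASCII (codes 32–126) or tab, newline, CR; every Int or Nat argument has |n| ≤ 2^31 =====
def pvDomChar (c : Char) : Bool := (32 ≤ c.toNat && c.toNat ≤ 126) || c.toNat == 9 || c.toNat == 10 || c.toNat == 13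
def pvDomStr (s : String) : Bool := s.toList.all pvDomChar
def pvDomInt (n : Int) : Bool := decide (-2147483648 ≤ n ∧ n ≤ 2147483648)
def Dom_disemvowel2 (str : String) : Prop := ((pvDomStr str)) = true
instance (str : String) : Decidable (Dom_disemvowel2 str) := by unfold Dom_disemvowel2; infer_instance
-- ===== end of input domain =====

-- B replaces A's split(' ')+nested index loop by a single character pass with a word-start flag (objective: simpler).

-- ===== PORT A =====
def pvVowels : List Char := ['a','e','i','o','u','A','E','I','O','U']

/-- A's inner loop body: `word[c]` kept at index 0, elsewhere kept unless a vowel. -/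
def pvAStep (word : List Char) (res : List Char) (c : Int) : List Char :=
  if c == 0 then res ++ [PySem.List.pyGetD word c ' ']
  else if pvVowels.contains (PySem.List.pyGetD word c ' ') then res
  else res ++ [PySem.List.pyGetD word c ' ']

def disemvowel2 (str : String) : String :=
  String.ofList ((PySem.Chars.splitOn str.toList [' ']).foldl (fun res word =>
    (PySem.List.pyRange 0 (PySem.List.len word)).foldl (pvAStep word) res ++ [' '])
    ([] : List Char))

-- ===== PORT B =====
/-- B's loop body: space restarts a word, a word-start char is kept, otherwise drop vowels. -/
def pvBStep (p : List Char × Bool) (c : Char) : List Char × Bool :=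
  if c == ' ' then (p.1 ++ [c], true)
  else if p.2 then (p.1 ++ [c], false)
  else if pvVowels.contains c then p
  else (p.1 ++ [c], false)

def disemvowel2_alt (str : String) : String :=
  String.ofList ((str.toList.foldl pvBStep (([] : List Char), true)).1 ++ [' '])

-- ===== PRECONDITION & SPEC =====
def Spec_disemvowel2 (str : String) (out : String) : Prop := out = disemvowel2_alt str
instance (str : String) (out : String) : Decidable (Spec_disemvowel2 str out) := by unfold Spec_disemvowel2; infer_instance

-- ===== CLAIM (what is proved, stated in full; the proofs are below) =====
def Claim_equal_disemvowel2 : Prop := ∀ (str : String), Dom_disemvowel2 str → Spec_disemvowel2 str (disemvowel2 str)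

-- ===== LEMMAS AND PROOFS =====

/-- What A does to one word: keep the first char, drop vowels in the rest, add a space. -/
def pvProcWord (w : List Char) : List Char :=
  (match w with
   | [] => []
   | h :: t => h :: t.filter (fun c => !pvVowels.contains c)) ++ [' ']

/-- Structural recursion computing split(' ') on a char list. -/
def pvSplit : List Char → List (List Char)
  | [] => [[]]
  | c :: cs =>
    if c = ' ' then [] :: pvSplit cs
    else (c :: (pvSplit cs).headI) :: (pvSplit cs).tail

/-- Structural recursion computing B's loop output from a given flag state. -/
def pvB : List Char → Bool → List Char
  | [], _ => []
  | c :: cs, flag =>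
    if c = ' ' then c :: pvB cs true
    else if flag then c :: pvB cs false
    else if pvVowels.contains c then pvB cs false
    else c :: pvB cs false

theorem pvSplit_ne_nil (cs : List Char) : pvSplit cs ≠ [] := by
  cases cs with
  | nil => simp [pvSplit]
  | cons c cs => by_cases h : c = ' ' <;> simp [pvSplit, h]

theorem pvSplit_go (fuel : Nat) (l cur : List Char) (acc : List (List Char))
    (h : l.length < fuel) :
    PySem.Chars.splitOn.go [' '] fuel l cur acc =
      acc.reverse ++ (cur.reverse ++ (pvSplit l).headI) :: (pvSplit l).tail := by
  induction fuel generalizing l cur acc with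
  | zero => omega
  | succ fuel ih =>
    cases l with
    | nil =>
      rw [PySem.Chars.splitOn.go.eq_def]
      simp [pvSplit]
    | cons c rest =>
      rw [PySem.Chars.splitOn.go.eq_def]
      by_cases hc : c = ' '
      · subst hc
        have hp : [' '].isPrefixOf (' ' :: rest) = true := by simp [List.isPrefixOf]
        simp only [hp, if_pos]
        rw [show List.drop [' '].length (' ' :: rest) = rest from rfl]
        rw [ih rest [] _ (by simpa using Nat.lt_of_succ_lt_succ (by simpa using h))]
        have hne := pvSplit_ne_nil rest
        cases hsp : pvSplit rest with
        | nil => exact absurd hsp hne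
        | cons hd tl => simp [pvSplit, hsp]
      · have hp : [' '].isPrefixOf (c :: rest) = false := by
          simp [List.isPrefixOf]
          exact Ne.symm hc
        simp only [hp, Bool.false_eq_true, if_false]
        rw [ih rest (c :: cur) acc (by simpa using Nat.lt_of_succ_lt_succ (by simpa using h))]
        have hne := pvSplit_ne_nil rest
        cases hsp : pvSplit rest with
        | nil => exact absurd hsp hne
        | cons hd tl => simp [pvSplit, hc, hsp]

theorem pvSplit_eq (cs : List Char) :
    PySem.Chars.splitOn cs [' '] = pvSplit cs := by
  rw [PySem.Chars.splitOn, pvSplit_go cs.length.succ cs [] [] (Nat.lt_succ_self _)]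
  have hne := pvSplit_ne_nil cs
  cases hsp : pvSplit cs with
  | nil => exact absurd hsp hne
  | cons hd tl => simp

/-- B's foldl in terms of pvB. -/
theorem pvB_foldl (cs : List Char) (acc : List Char) (flag : Bool) :
    (cs.foldl pvBStep (acc, flag)).1 = acc ++ pvB cs flag := by
  induction cs generalizing acc flag with
  | nil => simp [pvB]
  | cons c cs ih =>
    rw [List.foldl_cons]
    by_cases hc : c = ' '
    · rw [show pvBStep (acc, flag) c = (acc ++ [c], true) from by simp [pvBStep, hc]]
      rw [ih, pvB]
      simp [hc]
    · by_cases hf : flag = true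
      · subst hf
        rw [show pvBStep (acc, true) c = (acc ++ [c], false) from by simp [pvBStep, hc]]
        rw [ih, pvB]
        simp [hc]
      · replace hf : flag = false := by simpa using hf
        subst hf
        by_cases hv : pvVowels.contains c
        · have hv' : c ∈ pvVowels := by simpa using hv
          rw [show pvBStep (acc, false) c = (acc, false) from by
            simp only [pvBStep, hv]
            simp [hc]]
          rw [ih, pvB]
          simp [hc, hv']
        · have hvb : pvVowels.contains c = false := by simpa using hv
          rw [show pvBStep (acc, false) c = (acc ++ [c], false) from by
            simp only [pvBStep, hvb]
            simp [hc]]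
          rw [ih, pvB]
          have hv' : c ∉ pvVowels := by simpa using hv
          simp [hc, hv']

/-- A's per-word inner loop in terms of pvProcWord (minus the trailing space). -/
theorem pvInner (w : List Char) (res : List Char) :
    (PySem.List.pyRange 0 (PySem.List.len w)).foldl (pvAStep w) res
    = res ++ (match w with
      | [] => []
      | h :: t => h :: t.filter (fun c => !pvVowels.contains c)) := by
  cases w with
  | nil => simp [PySem.List.pyRange_one_eq_nil]
  | cons h t =>
    have hlen : (0 : Int) < PySem.List.len (h :: t) := by
      simp [PySem.List.len]
    rw [PySem.List.pyRange_one_cons hlen, List.foldl_cons]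
    rw [show pvAStep (h :: t) res 0 = res ++ [h] from by
      simp [pvAStep, PySem.List.pyGetD_ofNat']]
    rw [PySem.List.foldl_congr_mem _ (pvAStep (h :: t))
      (fun acc c => (fun (acc : List Char) (x : Char) =>
        if !pvVowels.contains x then acc ++ [x] else acc) acc
          (PySem.List.pyGetD (h :: t) c ' ')) _
      (by
        intro acc x hx
        have hx1 := (PySem.List.mem_pyRange_one.mp hx).1
        have hx0 : (x == 0) = false := by
          simp
          omega
        cases hv : pvVowels.contains (PySem.List.pyGetD (h :: t) x ' ') <;>
          simp [pvAStep, hx0])]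
    simp only [zero_add]
    rw [PySem.List.foldl_pyRange_pyGetD (h :: t) ' '
      (fun (acc : List Char) (x : Char) =>
        if !pvVowels.contains x then acc ++ [x] else acc)
      (res ++ [h]) (by norm_num : (0:Int) ≤ 1)]
    simp only [Int.toNat_one, List.drop_succ_cons, List.drop_zero]
    have hfi := PySem.List.foldl_append_if (fun c => !pvVowels.contains c)
      (id : Char → Char) t (res ++ [h])
    simp only [id_eq] at hfi
    rw [hfi]
    simp

/-- The split-and-process result equals B's single pass. -/
theorem pvMain (cs : List Char) :
    (pvSplit cs).flatMap pvProcWord = pvB cs true ++ [' ']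
    ∧ pvB cs false ++ [' ']
      = ((pvSplit cs).headI.filter (fun c => !pvVowels.contains c)) ++ [' ']
        ++ (pvSplit cs).tail.flatMap pvProcWord := by
  induction cs with
  | nil => simp [pvSplit, pvB, pvProcWord]
  | cons c cs ih =>
    obtain ⟨ih1, ih2⟩ := ih
    by_cases hc : c = ' '
    · subst hc
      refine ⟨?_, ?_⟩
      · simp [pvSplit, pvB, pvProcWord, ih1]
      · simp [pvSplit, pvB, ih1]
    · by_cases hv : pvVowels.contains c
      · have hv' : c ∈ pvVowels := by simpa using hv
        refine ⟨?_, ?_⟩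
        · simp [pvSplit, pvB, pvProcWord, hc, ih2]
        · simp [pvSplit, pvB, hc, hv', ih2]
      · have hv' : c ∉ pvVowels := by simpa using hv
        refine ⟨?_, ?_⟩
        · simp [pvSplit, pvB, pvProcWord, hc, ih2]
        · simp [pvSplit, pvB, hc, hv', ih2]

-- ===== VERDICT (by name: the statement is the Claim_ definition above) =====
theorem disemvowel2_spec : Claim_equal_disemvowel2 := by
  intro str _
  unfold Spec_disemvowel2 disemvowel2 disemvowel2_alt
  rw [pvB_foldl str.toList [] true]
  rw [PySem.List.foldl_congr_mem _ _ (fun res word => res ++ pvProcWord word) _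
        (by intro acc w _; rw [pvInner]; simp [pvProcWord])]
  rw [PySem.List.foldl_append_eq_flatMap, pvSplit_eq, (pvMain str.toList).1]
  simp
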